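-- pv_equiv track=rewrite | github.com/NoteSquare/zigmap-tool | proj/preprocess/subway_station.py | transfer_station
-- ===== SOURCE A (Python) =====
-- def transfer_station(stations):
--     buf = {}
--     # 이름이 같으면 환승역
--     for s in stations:
--         name = stations[s]['name']
--         if name == '':
--             continue
--         elif name in buf:
--             buf[name].append(s)
--         else:
--             buf.update({name: [s]})
--     return buf
-- ===== SOURCE B (Python) =====
-- def transfer_station(stations):
--     # Name-major grouping: dedup the non-empty names in first-occurrence order,
--     # then collect each name's keys with one comprehension per name.
--     names = [stations[s]['name'] for s in stations]
--     order = dict.fromkeys(n for n in names if n != '')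
--     return {n: [s for s in stations if stations[s]['name'] == n] for n in order}
-- ===== Notes on version B (the rewrite author's own statement) =====
-- stated objective: alternative
-- what changed: Replaces the single-pass mutable-dict accumulation (append-or-insert per key) with a name-major two-phase plan: dedup the non-empty names in first-occurrence order, then build each group by a per-name comprehension over the keys.
import Mathlib
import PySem

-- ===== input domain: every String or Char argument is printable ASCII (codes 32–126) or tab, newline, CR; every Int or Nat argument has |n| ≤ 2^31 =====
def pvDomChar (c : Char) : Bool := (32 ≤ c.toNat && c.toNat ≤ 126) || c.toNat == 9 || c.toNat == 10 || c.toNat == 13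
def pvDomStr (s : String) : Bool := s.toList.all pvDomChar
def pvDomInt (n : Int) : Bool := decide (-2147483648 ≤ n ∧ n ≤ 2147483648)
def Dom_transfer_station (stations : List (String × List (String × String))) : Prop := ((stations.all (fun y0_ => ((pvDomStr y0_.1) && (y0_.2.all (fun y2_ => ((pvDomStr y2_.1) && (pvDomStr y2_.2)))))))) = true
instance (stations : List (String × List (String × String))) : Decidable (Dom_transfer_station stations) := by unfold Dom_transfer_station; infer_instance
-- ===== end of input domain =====

-- B groups name-major (dedup the non-empty names, then one comprehension per name) instead of A's one-pass mutable-dict accumulation; objective: alternative decomposition, same return value.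


-- ===== PORT A =====
-- stations arrives as a Python dict: PySem.Dict.ofList collapses duplicate keys
-- exactly as dict construction does (last value wins, first position kept); the
-- inner dicts likewise.  stations[s]['name'] is getD under Pre_ (the key exists).
def transfer_station (stations : List (String × List (String × String))) : List (String × List String) :=
  let d := PySem.Dict.ofList stations
  (d.keys.foldl (fun buf s =>
      let name := (PySem.Dict.ofList (d.getD s [])).getD "name" ""
      if name == "" then buf
      else if buf.contains name then buf.modify name [] (fun l => l ++ [s])
      else buf.insert name [s])
    PySem.Dict.empty).items

-- ===== PORT B =====
def transfer_station_alt (stations : List (String × List (String × String))) : List (String × List String) :=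
  let d := PySem.Dict.ofList stations
  let names := d.keys.map (fun s => (PySem.Dict.ofList (d.getD s [])).getD "name" "")
  let order := PySem.List.dedup (names.filter (fun n => n != ""))
  order.map (fun n => (n, d.keys.filter (fun s => ((PySem.Dict.ofList (d.getD s [])).getD "name" "" == n))))

-- ===== PRECONDITION & SPEC =====
-- Pre_ excludes exactly the inputs on which stations[s]['name'] raises KeyError:
-- some entry of the dict built from stations has an inner dict without key "name".
def Pre_transfer_station (stations : List (String × List (String × String))) : Prop :=
  ∀ p ∈ (PySem.Dict.ofList stations).items, "name" ∈ p.2.map Prod.fst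
instance (stations : List (String × List (String × String))) : Decidable (Pre_transfer_station stations) := by unfold Pre_transfer_station; infer_instance

def pvWitness_transfer_station : (List (String × List (String × String))) :=
  [("A1", [("name", "x")]), ("B2", [("name", "")]), ("C3", [("name", "x")])]

def Spec_transfer_station (stations : List (String × List (String × String))) (out : List (String × List String)) : Prop := out = transfer_station_alt stations
instance (stations : List (String × List (String × String))) (out : List (String × List String)) : Decidable (Spec_transfer_station stations out) := by unfold Spec_transfer_station; infer_instance

-- ===== CLAIM (what is proved, stated in full; the proofs are below) =====
def Claim_equal_transfer_station : Prop := ∀ (stations : List (String × List (String × String))), Dom_transfer_station stations → Pre_transfer_station stations → Spec_transfer_station stations (transfer_station stations)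

-- ===== LEMMAS AND PROOFS =====

-- A's loop, generalised over the name function f (the ports instantiate
-- f s := (ofList (d.getD s [])).getD "name" "").

theorem pvLoop_getD (f : String → String) (keys : List String)
    (d : PySem.Dict String (List String)) (m : String) (hm : m ≠ "") :
    (keys.foldl (fun buf s =>
        let name := f s
        if name == "" then buf
        else if buf.contains name then buf.modify name [] (fun l => l ++ [s])
        else buf.insert name [s]) d).getD m []
      = d.getD m [] ++ keys.filter (fun s => f s == m) := by
  induction keys generalizing d with
  | nil => simp
  | cons s ks ih =>
    simp only [List.foldl_cons, List.filter_cons]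
    rw [ih]
    by_cases h0 : f s = ""
    · simpa [h0] using hm
    · by_cases hc : d.contains (f s) = true
      · by_cases h1 : f s = m
        · subst h1
          simp [h0, hc, PySem.Dict.getD_modify_self]
        · have hm' : m ≠ f s := fun h => h1 h.symm
          have hne : (f s == m) = false := beq_eq_false_iff_ne.mpr h1
          simp [h0, hc, PySem.Dict.getD_modify, hm', hne]
      · have hc' : d.contains (f s) = false := by simpa using hc
        by_cases h1 : f s = m
        · subst h1
          simp [h0, hc', PySem.Dict.getD_insert_self,
            PySem.Dict.getD_of_not_contains d [] hc']
        · have hm' : m ≠ f s := fun h => h1 h.symm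
          have hne : (f s == m) = false := beq_eq_false_iff_ne.mpr h1
          simp [h0, hc', PySem.Dict.getD_insert, hm', hne]

theorem pvLoop_keys (f : String → String) (keys : List String)
    (d : PySem.Dict String (List String)) :
    (keys.foldl (fun buf s =>
        let name := f s
        if name == "" then buf
        else if buf.contains name then buf.modify name [] (fun l => l ++ [s])
        else buf.insert name [s]) d).keys
      = PySem.Set.update d.keys ((keys.map f).filter (fun n => n != "")) := by
  induction keys generalizing d with
  | nil => simp [PySem.Set.update]
  | cons s ks ih =>
    simp only [List.foldl_cons, List.map_cons, List.filter_cons]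
    rw [ih]
    by_cases h0 : f s = ""
    · simp [h0]
    · by_cases hc : d.contains (f s) = true
      · have hmem : f s ∈ d.keys := (PySem.Dict.contains_iff_mem_keys d (f s)).mp hc
        simp [h0, hc, PySem.Dict.keys_modify, PySem.Dict.keys_insert_of_contains,
          PySem.Set.update_cons, PySem.Set.add_of_mem hmem]
      · have hc' : d.contains (f s) = false := by simpa using hc
        have hmem : f s ∉ d.keys := fun h =>
          by simp [(PySem.Dict.contains_iff_mem_keys d (f s)).mpr h] at hc'
        simp [h0, hc', PySem.Dict.keys_insert_of_not_contains d _ hc',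
          PySem.Set.update_cons, PySem.Set.add_of_not_mem hmem]

theorem pvLoop_nodup_keys (f : String → String) (keys : List String) :
    (keys.foldl (fun buf s =>
        let name := f s
        if name == "" then buf
        else if buf.contains name then buf.modify name [] (fun l => l ++ [s])
        else buf.insert name [s]) PySem.Dict.empty).keys.Nodup := by
  rw [pvLoop_keys]
  simp only [PySem.Dict.keys_empty, PySem.Set.update_nil_left]
  exact PySem.Set.nodup_ofList ((keys.map f).filter (fun n => n != ""))

-- ===== VERDICT (by name: the statement is the Claim_ definition above) =====
theorem transfer_station_spec : Claim_equal_transfer_station := by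
  intro stations _ _
  unfold Spec_transfer_station transfer_station transfer_station_alt
  set d := PySem.Dict.ofList stations with hd
  set f : String → String := fun s => (PySem.Dict.ofList (d.getD s [])).getD "name" "" with hf
  set loop := d.keys.foldl (fun buf s =>
      let name := f s
      if name == "" then buf
      else if buf.contains name then buf.modify name [] (fun l => l ++ [s])
      else buf.insert name [s]) PySem.Dict.empty with hloop
  have hnd : loop.keys.Nodup := pvLoop_nodup_keys f d.keys
  have hkeys : loop.keys = PySem.List.dedup ((d.keys.map f).filter (fun n => n != "")) := by
    rw [hloop, pvLoop_keys]
    simp [PySem.Dict.keys_empty, PySem.Set.update_nil_left, PySem.List.dedup_eq_ofList]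
  rw [PySem.Dict.items_eq_map_keys loop hnd [], hkeys]
  apply List.map_congr_left
  intro n hn
  have hmem : n ∈ (d.keys.map f).filter (fun n => n != "") :=
    (PySem.List.mem_dedup _ n).mp hn
  have hne : n ≠ "" := by
    have := List.of_mem_filter hmem
    simpa using this
  rw [hloop, pvLoop_getD f d.keys PySem.Dict.empty n hne]
  simp [hf]
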